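-- pv_equiv track=rewrite | github.com/ibis-project/ibis | ibis/backends/pandas/newutils.py | _sql_like_to_regex
-- ===== SOURCE A (Python) =====
-- def _sql_like_to_regex(pattern, escape):
--     cur_i = 0
--     pattern_length = len(pattern)
--
--     while cur_i < pattern_length:
--         nxt_i = cur_i + 1
--
--         cur = pattern[cur_i]
--         nxt = pattern[nxt_i] if nxt_i < pattern_length else None
--
--         skip = 1
--
--         if nxt is not None and escape is not None and cur == escape:
--             yield nxt
--             skip = 2
--         elif cur == "%":
--             yield ".*"
--         elif cur == "_":
--             yield "."
--         else:
--             yield cur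
--
--         cur_i += skip
-- ===== SOURCE B (Python) =====
-- def _sql_like_to_regex(pattern, escape):
--     # pass 1: tokenize into (char, is_escaped) units by consuming an iterator
--     units = []
--     it = iter(pattern)
--     for ch in it:
--         if escape is not None and ch == escape:
--             nxt = next(it, None)
--             if nxt is None:
--                 units.append((ch, False))
--             else:
--                 units.append((nxt, True))
--         else:
--             units.append((ch, False))
--     # pass 2: map each unit to its regex fragment
--     for ch, escaped in units:
--         if escaped:
--             yield ch
--         elif ch == "%":
--             yield ".*"
--         elif ch == "_":
--             yield "."
--         else:
--             yield ch
-- ===== Notes on version B (the rewrite author's own statement) =====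
-- stated objective: alternative
-- what changed: Replaces A's index/skip while-loop over positions with a two-pass pipeline: first tokenize the pattern into (char, is_escaped) units by consuming a character stream, then map each unit to its regex fragment.
import Mathlib
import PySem

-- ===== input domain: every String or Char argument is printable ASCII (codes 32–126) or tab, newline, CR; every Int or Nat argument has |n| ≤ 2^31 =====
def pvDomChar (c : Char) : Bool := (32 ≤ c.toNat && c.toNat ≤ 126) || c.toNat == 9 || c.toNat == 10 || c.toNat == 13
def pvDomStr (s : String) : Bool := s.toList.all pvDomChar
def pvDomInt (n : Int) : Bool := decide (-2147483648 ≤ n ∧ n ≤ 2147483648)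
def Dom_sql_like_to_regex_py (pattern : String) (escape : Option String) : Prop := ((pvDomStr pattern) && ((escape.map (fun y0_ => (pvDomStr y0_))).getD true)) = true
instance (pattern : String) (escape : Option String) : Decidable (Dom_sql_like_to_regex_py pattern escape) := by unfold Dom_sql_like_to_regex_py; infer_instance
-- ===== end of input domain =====

-- ===== PORT A =====
-- B replaces A's index/skip while-loop by a two-pass tokenizer (pair each char with an
-- escaped flag, then map tokens to regex fragments); objective: alternative decomposition.

-- Python `cur == escape` compares a 1-char string with the escape string
def pvIsEsc (escape : Option String) (c : Char) : Bool :=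
  match escape with
  | none => false
  | some e => e.toList == [c]

-- the %/_/else branch chain of A (and of B's second pass)
def pvPlainTok (c : Char) : String :=
  if c = '%' then ".*" else if c = '_' then "." else String.ofList [c]

-- the while-loop of A: cur_i advances by skip ∈ {1,2}
def pvALoop (cs : List Char) (escape : Option String) (cur_i : Nat) : List String :=
  if h : cur_i < cs.length then
    let cur := cs[cur_i]
    match hn : cs[cur_i + 1]? with
    | some nxt =>
        if pvIsEsc escape cur then
          String.ofList [nxt] :: pvALoop cs escape (cur_i + 2)
        else
          pvPlainTok cur :: pvALoop cs escape (cur_i + 1)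
    | none => pvPlainTok cur :: pvALoop cs escape (cur_i + 1)
  else []
termination_by cs.length - cur_i

def sql_like_to_regex_py (pattern : String) (escape : Option String) : List String :=
  pvALoop pattern.toList escape 0

-- ===== PORT B =====
-- pass 1 of B: (char, is_escaped) units, consuming the stream
def pvTokenize (escape : Option String) : List Char → List (Char × Bool)
  | [] => []
  | c :: rest =>
      if pvIsEsc escape c then
        match rest with
        | [] => [(c, false)]
        | d :: rest' => (d, true) :: pvTokenize escape rest'
      else (c, false) :: pvTokenize escape rest

-- pass 2 of B: map a unit to its regex fragment
def pvEmit : Char × Bool → String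
  | (c, true) => String.ofList [c]
  | (c, false) => pvPlainTok c

def sql_like_to_regex_py_alt (pattern : String) (escape : Option String) : List String :=
  (pvTokenize escape pattern.toList).map pvEmit

-- ===== PRECONDITION & SPEC =====
def Spec_sql_like_to_regex_py (pattern : String) (escape : Option String) (out : List String) : Prop := out = sql_like_to_regex_py_alt pattern escape
instance (pattern : String) (escape : Option String) (out : List String) : Decidable (Spec_sql_like_to_regex_py pattern escape out) := by unfold Spec_sql_like_to_regex_py; infer_instance

-- ===== CLAIM (what is proved, stated in full; the proofs are below) =====
def Claim_equal_sql_like_to_regex_py : Prop := ∀ (pattern : String) (escape : Option String), Dom_sql_like_to_regex_py pattern escape → Spec_sql_like_to_regex_py pattern escape (sql_like_to_regex_py pattern escape)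

-- ===== LEMMAS AND PROOFS =====

-- ===== VERDICT (by name: the statement is the Claim_ definition above) =====
lemma pvALoop_eq_aux (escape : Option String) (cs : List Char) :
    ∀ (n i : Nat), cs.length - i ≤ n →
      pvALoop cs escape i = (pvTokenize escape (cs.drop i)).map pvEmit := by
  intro n
  induction n with
  | zero =>
      intro i hi
      have hle : cs.length ≤ i := by omega
      rw [pvALoop, List.drop_eq_nil_of_le hle]
      simp [Nat.not_lt.mpr hle, pvTokenize]
  | succ n ih =>
      intro i hi
      by_cases h : i < cs.length
      · rw [pvALoop, List.drop_eq_getElem_cons h]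
        simp only [h, dif_pos]
        cases hn : cs[i + 1]? with
        | some nxt =>
            have h1 : i + 1 < cs.length := by
              by_contra hc
              rw [List.getElem?_eq_none (by omega)] at hn; simp at hn
            have hnx : nxt = cs[i + 1] := by
              rw [List.getElem?_eq_getElem h1] at hn; exact (Option.some.injEq _ _).mp hn.symm
            rw [List.drop_eq_getElem_cons h1]
            by_cases he : pvIsEsc escape cs[i]
            · simp only [he, if_pos, pvTokenize, List.map_cons, pvEmit, hnx]
              exact congrArg _ (ih (i + 2) (by omega))
            · simp only [he, pvTokenize, Bool.false_eq_true, if_false,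
                List.map_cons, pvEmit]
              rw [← List.drop_eq_getElem_cons h1]
              exact congrArg _ (ih (i + 1) (by omega))
        | none =>
            have h1 : cs.length ≤ i + 1 := by
              by_contra hc
              rw [List.getElem?_eq_getElem (by omega)] at hn; simp at hn
            have hdrop : cs.drop (i + 1) = [] := List.drop_eq_nil_of_le h1
            rw [hdrop]
            have hrec : pvALoop cs escape (i + 1) = [] := by
              rw [pvALoop]; simp [Nat.not_lt.mpr h1]
            rw [hrec]
            by_cases he : pvIsEsc escape cs[i] <;>
              simp [pvTokenize, he, pvEmit]
      · rw [pvALoop, List.drop_eq_nil_of_le (by omega)]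
        simp [h, pvTokenize]

lemma pvALoop_eq (escape : Option String) (cs : List Char) (i : Nat) :
    pvALoop cs escape i = (pvTokenize escape (cs.drop i)).map pvEmit :=
  pvALoop_eq_aux escape cs (cs.length - i) i le_rfl


theorem sql_like_to_regex_py_spec : Claim_equal_sql_like_to_regex_py := by
  intro pattern escape _
  unfold Spec_sql_like_to_regex_py sql_like_to_regex_py sql_like_to_regex_py_alt
  simpa using pvALoop_eq escape pattern.toList 0
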